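-- pv_equiv track=rewrite | github.com/SaitoLab-Nitech/VTDroid | smalien/core/smali_handler/parser/method_parser/code_parser/examiner/obscr_examiner.py | __search_prev_data
-- ===== SOURCE A (Python) =====
-- def __search_prev_data(i, v, code, vdata, mdata):
--     for j in range(i - 1, mdata['start'], -1):
--         if (j in vdata.keys()):
--             if ('dst' in vdata[j].keys() and vdata[j]['dst'] == v):
--                 if ('dst_type' in vdata[j].keys()):
--                     return vdata[j]['dst_type']
--                 elif ('type' in vdata[j].keys() and vdata[j]['type'][0] == '['):
--                     return vdata[j]['type']
--                 else:
--                     break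
--             elif (
--                 vdata[j]['kind'] in ['cond', 'goto_label', 'switch_label', 'catch_label']
--             ):
--                 break
--     return '[unknown'
-- ===== SOURCE B (Python) =====
-- def __search_prev_data(i, v, code, vdata, mdata):
--     # Locate the nearest qualifying entry (max key in (start, i)) by a single
--     # pass over vdata's keys, then classify that one entry in a separate step.
--     start = mdata['start']
--     markers = ('cond', 'goto_label', 'switch_label', 'catch_label')
--     best = None
--     for j in vdata:
--         if start < j < i and (best is None or j > best):
--             d = vdata[j]
--             if d.get('dst') == v or d['kind'] in markers:
--                 best = j
--     if best is not None:
--         d = vdata[best]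
--         if d.get('dst') == v:
--             if 'dst_type' in d:
--                 return d['dst_type']
--             if 'type' in d and d['type'][0] == '[':
--                 return d['type']
--     return '[unknown'
-- ===== Notes on version B (the rewrite author's own statement) =====
-- stated objective: faster
-- what changed: Instead of walking the index range i-1..start+1 backwards and deciding inside the loop, B makes one pass over vdata's keys to find the maximum qualifying key in (start, i), then classifies that single entry in a separate step.
import Mathlib
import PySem

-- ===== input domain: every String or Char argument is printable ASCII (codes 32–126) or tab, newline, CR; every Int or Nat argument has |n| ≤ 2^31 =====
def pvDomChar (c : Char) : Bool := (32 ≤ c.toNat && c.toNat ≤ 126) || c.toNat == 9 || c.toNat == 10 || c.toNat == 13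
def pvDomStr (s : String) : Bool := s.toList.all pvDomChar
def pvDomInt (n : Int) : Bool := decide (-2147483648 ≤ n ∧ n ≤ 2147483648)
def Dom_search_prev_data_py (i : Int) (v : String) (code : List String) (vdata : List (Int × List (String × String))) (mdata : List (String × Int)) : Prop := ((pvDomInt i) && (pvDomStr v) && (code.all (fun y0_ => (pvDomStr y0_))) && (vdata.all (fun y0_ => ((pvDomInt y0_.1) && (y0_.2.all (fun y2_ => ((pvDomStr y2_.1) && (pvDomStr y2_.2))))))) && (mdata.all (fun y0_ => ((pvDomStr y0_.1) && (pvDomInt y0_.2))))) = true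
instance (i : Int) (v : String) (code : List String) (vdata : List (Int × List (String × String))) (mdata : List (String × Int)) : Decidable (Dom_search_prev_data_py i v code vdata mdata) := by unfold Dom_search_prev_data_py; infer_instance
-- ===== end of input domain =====

-- B locates the maximum qualifying key in (start, i) by one pass over vdata's keys, then
-- classifies that single entry; A scans the index range backwards deciding inline.


-- ===== PORT A =====
-- A's for-loop over range(i-1, mdata['start'], -1); 'return'/'break' become results.
-- Where Python raises (missing 'kind', empty 'type'), the totalized defaults are outside Pre_.
def pvLoopA (v : String) (vdata : List (Int × List (String × String))) : List Int → String
  | [] => "[unknown"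
  | j :: rest =>
    match PySem.Dict.get? (PySem.Dict.mk vdata) j with
    | none => pvLoopA v vdata rest
    | some dj =>
      if PySem.Dict.get? (PySem.Dict.mk dj) "dst" = some v then
        match PySem.Dict.get? (PySem.Dict.mk dj) "dst_type" with
        | some t => t
        | none =>
          match PySem.Dict.get? (PySem.Dict.mk dj) "type" with
          | some t => if PySem.Str.pyGet? t 0 = some '[' then t else "[unknown"
          | none => "[unknown"
      else if (["cond", "goto_label", "switch_label", "catch_label"] : List String).contains (PySem.Dict.getD (PySem.Dict.mk dj) "kind" "") then "[unknown"
      else pvLoopA v vdata rest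

def search_prev_data_py (i : Int) (v : String) (code : List String) (vdata : List (Int × List (String × String))) (mdata : List (String × Int)) : String :=
  pvLoopA v vdata (PySem.List.pyRange (i - 1) (PySem.Dict.getD (PySem.Dict.mk mdata) "start" 0) (-1))

-- ===== PORT B =====
-- body of B's `if start < j < i and ... : if d.get('dst') == v or d['kind'] in markers`
def pvQual (v : String) (vdata : List (Int × List (String × String))) (j : Int) : Bool :=
  match PySem.Dict.get? (PySem.Dict.mk vdata) j with
  | none => false
  | some dj =>
    decide (PySem.Dict.get? (PySem.Dict.mk dj) "dst" = some v) ||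
      (["cond", "goto_label", "switch_label", "catch_label"] : List String).contains (PySem.Dict.getD (PySem.Dict.mk dj) "kind" "")

def pvStep (i start : Int) (v : String) (vdata : List (Int × List (String × String))) (best : Option Int) (j : Int) : Option Int :=
  if (decide (start < j) && decide (j < i) &&
      (match best with | none => true | some b => decide (b < j))) = true then
    (if pvQual v vdata j then some j else best)
  else best

def pvBest (i start : Int) (v : String) (vdata : List (Int × List (String × String))) : Option Int :=
  (PySem.Dict.keys (PySem.Dict.mk vdata)).foldl (pvStep i start v vdata) none

def search_prev_data_py_alt (i : Int) (v : String) (code : List String) (vdata : List (Int × List (String × String))) (mdata : List (String × Int)) : String :=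
  let start := PySem.Dict.getD (PySem.Dict.mk mdata) "start" 0
  match pvBest i start v vdata with
  | none => "[unknown"
  | some b =>
    match PySem.Dict.get? (PySem.Dict.mk vdata) b with
    | none => "[unknown"  -- unreachable: pvBest only returns keys of vdata
    | some dj =>
      if PySem.Dict.get? (PySem.Dict.mk dj) "dst" = some v then
        match PySem.Dict.get? (PySem.Dict.mk dj) "dst_type" with
        | some t => t
        | none =>
          match PySem.Dict.get? (PySem.Dict.mk dj) "type" with
          | some t => if PySem.Str.pyGet? t 0 = some '[' then t else "[unknown"
          | none => "[unknown"
      else "[unknown"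

-- ===== PRECONDITION & SPEC =====
-- Pre_ excludes the inputs where Python A raises: mdata without 'start' (KeyError), a scanned
-- entry whose 'dst' does not equal v and that lacks 'kind' (KeyError), or a dst-matching entry
-- without 'dst_type' whose 'type' is the empty string (IndexError). It is stated over every
-- vdata pair with key strictly between start and i, so it also excludes some inputs A returns
-- on (ill-formed entries that A never visits because the scan returns or breaks earlier).
def Pre_search_prev_data_py (i : Int) (v : String) (code : List String) (vdata : List (Int × List (String × String))) (mdata : List (String × Int)) : Prop :=
  (PySem.Dict.mk mdata).contains "start" = true ∧
  (∀ p ∈ vdata, PySem.Dict.getD (PySem.Dict.mk mdata) "start" 0 < p.1 → p.1 < i →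
    ((PySem.Dict.get? (PySem.Dict.mk p.2) "dst" = some v ∨ (PySem.Dict.mk p.2).contains "kind" = true) ∧
     (PySem.Dict.get? (PySem.Dict.mk p.2) "dst" = some v →
      PySem.Dict.get? (PySem.Dict.mk p.2) "dst_type" = none →
      ¬ PySem.Dict.get? (PySem.Dict.mk p.2) "type" = some "")))
instance (i : Int) (v : String) (code : List String) (vdata : List (Int × List (String × String))) (mdata : List (String × Int)) : Decidable (Pre_search_prev_data_py i v code vdata mdata) := by unfold Pre_search_prev_data_py; infer_instance

def pvWitness_search_prev_data_py : Int × String × List String × (List (Int × List (String × String))) × (List (String × Int)) :=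
  (3, "x", [], [(2, [("dst", "x"), ("dst_type", "[I")])], [("start", 0)])

def Spec_search_prev_data_py (i : Int) (v : String) (code : List String) (vdata : List (Int × List (String × String))) (mdata : List (String × Int)) (out : String) : Prop := out = search_prev_data_py_alt i v code vdata mdata
instance (i : Int) (v : String) (code : List String) (vdata : List (Int × List (String × String))) (mdata : List (String × Int)) (out : String) : Decidable (Spec_search_prev_data_py i v code vdata mdata out) := by unfold Spec_search_prev_data_py; infer_instance

-- ===== CLAIM (what is proved, stated in full; the proofs are below) =====
def Claim_equal_search_prev_data_py : Prop := ∀ (i : Int) (v : String) (code : List String) (vdata : List (Int × List (String × String))) (mdata : List (String × Int)), Dom_search_prev_data_py i v code vdata mdata → Pre_search_prev_data_py i v code vdata mdata → Spec_search_prev_data_py i v code vdata mdata (search_prev_data_py i v code vdata mdata)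

-- ===== LEMMAS AND PROOFS =====

-- the value A returns when j is the first qualifying index (and B returns when j is the
-- maximal qualifying key): classification of the single entry vdata[j]
def pvOutAt (v : String) (vdata : List (Int × List (String × String))) (j : Int) : String :=
  match PySem.Dict.get? (PySem.Dict.mk vdata) j with
  | none => "[unknown"
  | some dj =>
    if PySem.Dict.get? (PySem.Dict.mk dj) "dst" = some v then
      match PySem.Dict.get? (PySem.Dict.mk dj) "dst_type" with
      | some t => t
      | none =>
        match PySem.Dict.get? (PySem.Dict.mk dj) "type" with
        | some t => if PySem.Str.pyGet? t 0 = some '[' then t else "[unknown"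
        | none => "[unknown"
    else "[unknown"

def pvGood (i start : Int) (v : String) (vdata : List (Int × List (String × String))) (j : Int) : Prop :=
  start < j ∧ j < i ∧ pvQual v vdata j = true

-- A's loop = classify the first qualifying index of the scanned list
lemma loopA_eq_find (v : String) (vdata : List (Int × List (String × String))) :
    ∀ l : List Int, pvLoopA v vdata l =
      match l.find? (pvQual v vdata) with
      | none => "[unknown"
      | some j => pvOutAt v vdata j := by
  intro l
  induction l with
  | nil => simp [pvLoopA, List.find?]
  | cons j rest ih =>
    cases hg : PySem.Dict.get? (PySem.Dict.mk vdata) j with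
    | none =>
      have hq : pvQual v vdata j = false := by simp [pvQual, hg]
      have hfind : List.find? (pvQual v vdata) (j :: rest) = List.find? (pvQual v vdata) rest :=
        List.find?_cons_of_neg (by simp [hq])
      rw [hfind, ← ih]
      simp [pvLoopA, hg]
    | some dj =>
      by_cases hd : PySem.Dict.get? (PySem.Dict.mk dj) "dst" = some v
      · have hq : pvQual v vdata j = true := by simp [pvQual, hg, hd]
        have hfind : List.find? (pvQual v vdata) (j :: rest) = some j :=
          List.find?_cons_of_pos hq
        rw [hfind]
        simp [pvLoopA, pvOutAt, hg, hd]
      · by_cases hk : PySem.Dict.getD (PySem.Dict.mk dj) "kind" "" ∈ (["cond", "goto_label", "switch_label", "catch_label"] : List String)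
        · have hq : pvQual v vdata j = true := by
            simp [pvQual, hg]
            exact Or.inr (by simpa using hk)
          have hfind : List.find? (pvQual v vdata) (j :: rest) = some j :=
            List.find?_cons_of_pos hq
          rw [hfind]
          simp [pvLoopA, pvOutAt, hg, hd, hk]
        · have hq : pvQual v vdata j = false := by
            simp [pvQual, hg, hd]
            simpa using hk
          have hfind : List.find? (pvQual v vdata) (j :: rest) = List.find? (pvQual v vdata) rest :=
            List.find?_cons_of_neg (by simp [hq])
          rw [hfind, ← ih]
          simp [pvLoopA, hg, hd, hk]

-- find? on the countdown range = the MAXIMAL index of (b, a] satisfying Q (none: no such index)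
lemma findR_spec (Q : Int → Bool) :
    ∀ (n : Nat) (a b : Int), (a - b).toNat = n →
      (((PySem.List.pyRange a b (-1)).find? Q = none → ∀ j, b < j → j ≤ a → Q j = false) ∧
       (∀ m, (PySem.List.pyRange a b (-1)).find? Q = some m →
          b < m ∧ m ≤ a ∧ Q m = true ∧ ∀ j, m < j → j ≤ a → Q j = false)) := by
  intro n
  induction n with
  | zero =>
    intro a b h
    have hab : a ≤ b := by omega
    rw [PySem.List.pyRange_neg_one_eq_nil hab]
    constructor
    · intro _ j hbj hja; omega
    · intro m hm; simp [List.find?] at hm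
  | succ n ih =>
    intro a b h
    have hba : b < a := by omega
    rw [PySem.List.pyRange_neg_one_cons hba]
    have ih' := ih (a - 1) b (by omega)
    cases hqa : Q a with
    | true =>
      constructor
      · intro hnone; rw [List.find?_cons_of_pos hqa] at hnone; exact absurd hnone (by simp)
      · intro m hm
        rw [List.find?_cons_of_pos hqa] at hm
        have : m = a := by injection hm; omega
        subst this
        exact ⟨hba, le_refl _, hqa, fun j h1 h2 => absurd (lt_of_lt_of_le h1 h2) (lt_irrefl _)⟩
    | false =>
      constructor
      · intro hnone
        rw [List.find?_cons_of_neg (by simp [hqa])] at hnone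
        intro j hbj hja
        rcases eq_or_lt_of_le hja with rfl | hlt
        · exact hqa
        · exact ih'.1 hnone j hbj (by omega)
      · intro m hm
        rw [List.find?_cons_of_neg (by simp [hqa])] at hm
        obtain ⟨h1, h2, h3, h4⟩ := ih'.2 m hm
        refine ⟨h1, by omega, h3, ?_⟩
        intro j hmj hja
        rcases eq_or_lt_of_le hja with rfl | hlt
        · exact hqa
        · exact h4 j hmj (by omega)

-- one step of B's fold
lemma step_none (i start : Int) (v : String) (vd : List (Int × List (String × String))) (acc : Option Int) (j : Int)
    (h : pvStep i start v vd acc j = none) :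
    acc = none ∧ ¬ pvGood i start v vd j := by
  cases acc with
  | none =>
    refine ⟨rfl, fun hgood => ?_⟩
    obtain ⟨h1, h2, h3⟩ := hgood
    simp only [pvStep] at h
    rw [if_pos (by simp [h1, h2])] at h
    rw [if_pos h3] at h
    exact absurd h (by simp)
  | some x =>
    simp only [pvStep] at h
    split at h
    · split at h
      · exact absurd h (by simp)
      · exact absurd h (by simp)
    · exact absurd h (by simp)

lemma step_some (i start : Int) (v : String) (vd : List (Int × List (String × String))) (acc : Option Int) (j b : Int)
    (h : pvStep i start v vd acc j = some b) :
    (pvGood i start v vd j ∧ b = j) ∨ acc = some b := by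
  cases acc with
  | none =>
    simp only [pvStep] at h
    split at h
    · rename_i hg
      split at h
      · rename_i hq
        simp only [Bool.and_eq_true, decide_eq_true_eq] at hg
        exact Or.inl ⟨⟨hg.1.1, hg.1.2, hq⟩, by injection h; omega⟩
      · exact absurd h (by simp)
    · exact absurd h (by simp)
  | some x =>
    simp only [pvStep] at h
    split at h
    · rename_i hg
      split at h
      · rename_i hq
        simp only [Bool.and_eq_true, decide_eq_true_eq] at hg
        exact Or.inl ⟨⟨hg.1.1, hg.1.2, hq⟩, by injection h; omega⟩
      · exact Or.inr h
    · exact Or.inr h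

lemma step_good (i start : Int) (v : String) (vd : List (Int × List (String × String))) (acc : Option Int) (j : Int)
    (h : pvGood i start v vd j) :
    ∃ y, pvStep i start v vd acc j = some y ∧ j ≤ y := by
  obtain ⟨h1, h2, h3⟩ := h
  cases acc with
  | none => exact ⟨j, by simp [pvStep, h1, h2, h3], le_refl _⟩
  | some x =>
    by_cases hxj : x < j
    · exact ⟨j, by simp [pvStep, h1, h2, h3, hxj], le_refl _⟩
    · exact ⟨x, by simp [pvStep, hxj], by omega⟩

lemma step_mono (i start : Int) (v : String) (vd : List (Int × List (String × String))) (acc : Option Int) (j x : Int)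
    (h : acc = some x) :
    ∃ y, pvStep i start v vd acc j = some y ∧ x ≤ y := by
  subst h
  simp only [pvStep]
  split
  · split
    · rename_i hg _
      simp only [Bool.and_eq_true, decide_eq_true_eq] at hg
      exact ⟨j, rfl, by omega⟩
    · exact ⟨x, rfl, le_refl _⟩
  · exact ⟨x, rfl, le_refl _⟩

-- characterization of B's fold: it computes the maximal good element of the key list
lemma best_foldl_spec (i start : Int) (v : String) (vd : List (Int × List (String × String))) :
    ∀ (l : List Int) (acc : Option Int),
      ((l.foldl (pvStep i start v vd) acc = none →
          acc = none ∧ ∀ j ∈ l, ¬ pvGood i start v vd j) ∧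
       (∀ b, l.foldl (pvStep i start v vd) acc = some b →
          (pvGood i start v vd b ∨ acc = some b)) ∧
       (∀ j ∈ l, pvGood i start v vd j →
          ∃ b, l.foldl (pvStep i start v vd) acc = some b ∧ j ≤ b) ∧
       (∀ x b, acc = some x → l.foldl (pvStep i start v vd) acc = some b → x ≤ b)) := by
  intro l
  induction l with
  | nil =>
    intro acc
    refine ⟨fun h => ⟨h, by simp⟩, fun b h => Or.inr h, by simp, ?_⟩
    intro x b hx hb; rw [hx] at hb; injection hb; omega
  | cons j rest ih =>
    intro acc
    have IH := ih (pvStep i start v vd acc j)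
    simp only [List.foldl_cons]
    refine ⟨?_, ?_, ?_, ?_⟩
    · intro hnone
      obtain ⟨hstep, hrest⟩ := IH.1 hnone
      obtain ⟨hacc, hgj⟩ := step_none i start v vd acc j hstep
      refine ⟨hacc, ?_⟩
      intro x hx
      rcases List.mem_cons.mp hx with rfl | hx
      · exact hgj
      · exact hrest x hx
    · intro b hb
      rcases IH.2.1 b hb with hgood | hstep
      · exact Or.inl hgood
      · rcases step_some i start v vd acc j b hstep with ⟨hgj, rfl⟩ | hacc
        · exact Or.inl hgj
        · exact Or.inr hacc
    · intro j0 hj0 hgood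
      rcases List.mem_cons.mp hj0 with rfl | hj0
      · obtain ⟨y, hy, hjy⟩ := step_good i start v vd acc j0 hgood
        cases hr : rest.foldl (pvStep i start v vd) (pvStep i start v vd acc j0) with
        | none =>
          obtain ⟨h1, _⟩ := IH.1 hr
          rw [hy] at h1; exact absurd h1 (by simp)
        | some b =>
          exact ⟨b, rfl, le_trans hjy (IH.2.2.2 y b hy hr)⟩
      · exact IH.2.2.1 j0 hj0 hgood
    · intro x b hx hb
      obtain ⟨y, hy, hxy⟩ := step_mono i start v vd acc j x hx
      exact le_trans hxy (IH.2.2.2 y b hy hb)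

lemma qual_mem_keys (v : String) (vd : List (Int × List (String × String))) (j : Int)
    (h : pvQual v vd j = true) : j ∈ (PySem.Dict.mk vd).keys := by
  unfold pvQual at h
  cases hg : PySem.Dict.get? (PySem.Dict.mk vd) j with
  | none => rw [hg] at h; simp at h
  | some dj =>
    by_contra hmem
    rw [(PySem.Dict.get?_eq_none_iff_not_mem_keys _ _).mpr hmem] at hg
    exact absurd hg (by simp)

-- ===== VERDICT (by name: the statement is the Claim_ definition above) =====
theorem search_prev_data_py_spec : Claim_equal_search_prev_data_py := by
  intro i v code vdata mdata _hdom _hpre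
  unfold Spec_search_prev_data_py search_prev_data_py search_prev_data_py_alt
  set start := PySem.Dict.getD (PySem.Dict.mk mdata) "start" 0 with hstart
  have hfold := best_foldl_spec i start v vdata ((PySem.Dict.mk vdata).keys) none
  have hfind := findR_spec (pvQual v vdata) ((i - 1) - start).toNat (i - 1) start rfl
  rw [loopA_eq_find]
  dsimp only
  cases hb : pvBest i start v vdata with
  | none =>
    have hnog : ∀ j, ¬ pvGood i start v vdata j := fun j hgood =>
      (hfold.1 hb).2 j (qual_mem_keys v vdata j hgood.2.2) hgood
    cases hf : (PySem.List.pyRange (i - 1) start (-1)).find? (pvQual v vdata) with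
    | none => rfl
    | some m =>
      obtain ⟨h1, h2, h3, _⟩ := hfind.2 m hf
      exact absurd ⟨h1, by omega, h3⟩ (hnog m)
  | some b =>
    have hgb : pvGood i start v vdata b := by
      rcases hfold.2.1 b (by unfold pvBest at hb; exact hb) with h | h
      · exact h
      · exact absurd h (by simp)
    obtain ⟨hg1, hg2, hg3⟩ := hgb
    cases hf : (PySem.List.pyRange (i - 1) start (-1)).find? (pvQual v vdata) with
    | none =>
      have hq := hfind.1 hf b hg1 (by omega)
      rw [hg3] at hq
      exact absurd hq (by simp)
    | some m =>
      obtain ⟨h1, h2, h3, h4⟩ := hfind.2 m hf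
      have hmb : m ≤ b := by
        obtain ⟨b', hb', hmb'⟩ := hfold.2.2.1 m (qual_mem_keys v vdata m h3) ⟨h1, by omega, h3⟩
        have hbb : pvBest i start v vdata = some b' := hb'
        rw [hb] at hbb
        injection hbb with h'
        omega
      have hbm : b = m := by
        rcases lt_or_eq_of_le hmb with hlt | heq
        · have hq := h4 b hlt (by omega)
          rw [hg3] at hq
          exact absurd hq (by simp)
        · omega
      subst hbm
      simp only [pvOutAt]
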